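-- pv_equiv track=rewrite | github.com/ywcheong/solved-baekjoon | solve/1000+/1230.py | solve
-- ===== SOURCE A (Python) =====
-- def solve(original, target):
--     """write your logic here"""
--     olen, tlen = len(original), len(target)
--     memo = [[None] * (tlen + 1) for _ in range(olen + 1)]
--
--     for o_sublen in range(olen + 1):
--         for t_sublen in range(tlen + 1):
--             result = None
--
--             if o_sublen == 0:
--                 if t_sublen == 0:
--                     result = 0
--                 else:
--                     result = 1
--             else:
--                 o_char = original[o_sublen - 1]
--                 result = float("inf")
--
--                 for t_index in range(t_sublen):
--                     t_char = target[t_index]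
--
--                     if o_char == t_char:
--                         this_result = memo[o_sublen - 1][t_index]
--
--                         if t_index < t_sublen - 1:
--                             this_result += 1
--
--                         result = min(result, this_result)
--
--             memo[o_sublen][t_sublen] = result
--
--     output = memo[olen][tlen]
--     if output == float("inf"):
--         return -1
--     return output
-- ===== SOURCE B (Python) =====
-- def solve(original, target):
--     # O(len(original)*len(target)): running minimum over matched prev-row values
--     # replaces A's inner rescan; None plays the role of +infinity.
--     tlen = len(target)
--     prev = [0] + [1] * tlen
--     for c in original:
--         cur = [None] * (tlen + 1)
--         run = None
--         for t in range(1, tlen + 1):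
--             best = None if run is None else run + 1
--             if target[t - 1] == c:
--                 p = prev[t - 1]
--                 if p is not None and (best is None or p < best):
--                     best = p
--                 if p is not None and (run is None or p < run):
--                     run = p
--             cur[t] = best
--         prev = cur
--     return -1 if prev[tlen] is None else prev[tlen]
-- ===== Notes on version B (the rewrite author's own statement) =====
-- stated objective: faster
-- what changed: Replaces A's inner rescan of all matching earlier target positions with a running minimum of previous-row matched values carried along the row, dropping a factor of len(target).
import Mathlib
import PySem

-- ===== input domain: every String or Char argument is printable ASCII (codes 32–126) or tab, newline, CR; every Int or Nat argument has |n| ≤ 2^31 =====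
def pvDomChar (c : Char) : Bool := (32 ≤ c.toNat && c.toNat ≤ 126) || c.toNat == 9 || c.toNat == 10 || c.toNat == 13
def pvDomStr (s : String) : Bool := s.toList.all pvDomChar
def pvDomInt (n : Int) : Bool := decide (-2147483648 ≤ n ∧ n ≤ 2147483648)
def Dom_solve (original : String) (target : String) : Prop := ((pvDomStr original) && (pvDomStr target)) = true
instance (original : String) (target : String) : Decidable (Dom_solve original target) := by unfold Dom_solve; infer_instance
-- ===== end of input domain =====

-- B replaces A's O(tlen) inner rescan per cell by a running minimum carried along the row.

-- Python's float('inf') is modelled by `none`; `minO` is Python's `min` on that domain.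
def minO (a b : Option Int) : Option Int :=
  match a, b with
  | none, b => b
  | some x, none => some x
  | some x, some y => some (min x y)

-- ===== PORT A =====
-- inner `for t_index in range(t_sublen)` loop of A, computing memo[o][t]
def entryA (prev : List (Option Int)) (tgt : List Char) (c : Char) (t : Nat) : Option Int :=
  (List.range t).foldl
    (fun acc ti =>
      if tgt.getD ti ' ' == c then
        minO acc ((prev.getD ti none).map (fun v => if ti < t - 1 then v + 1 else v))
      else acc)
    none

-- one row of A's memo (the o_sublen > 0 case, over t_sublen = 0..tlen)
def rowA (prev : List (Option Int)) (tgt : List Char) (c : Char) : List (Option Int) :=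
  (List.range (tgt.length + 1)).map (entryA prev tgt c)

-- A's row for o_sublen = 0
def row0A (tlen : Nat) : List (Option Int) :=
  (List.range (tlen + 1)).map (fun t => if t = 0 then some (0 : Int) else some 1)

def solve (original : String) (target : String) : Int :=
  let tg := target.toList
  let final := original.toList.foldl (fun prev c => rowA prev tg c) (row0A tg.length)
  match final.getD tg.length none with
  | none => -1
  | some v => v

-- ===== PORT B =====
-- one step of Source B's inner loop: state (run, cur); i = t - 1
def stepB (prev : List (Option Int)) (tgt : List Char) (c : Char)
    (st : Option Int × List (Option Int)) (i : Nat) : Option Int × List (Option Int) :=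
  let best := st.1.map (· + 1)
  if tgt.getD i ' ' == c then
    (minO st.1 (prev.getD i none), st.2 ++ [minO best (prev.getD i none)])
  else
    (st.1, st.2 ++ [best])

def rowB (prev : List (Option Int)) (tgt : List Char) (c : Char) : List (Option Int) :=
  ((List.range tgt.length).foldl (stepB prev tgt c) (none, [none])).2

-- Source B's  prev = [0] + [1] * tlen
def row0B (tlen : Nat) : List (Option Int) :=
  some 0 :: List.replicate tlen (some 1)

def solve_alt (original : String) (target : String) : Int :=
  let tg := target.toList
  let final := original.toList.foldl (fun prev c => rowB prev tg c) (row0B tg.length)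
  match final.getD tg.length none with
  | none => -1
  | some v => v

-- ===== PRECONDITION & SPEC =====
def Spec_solve (original : String) (target : String) (out : Int) : Prop := out = solve_alt original target
instance (original : String) (target : String) (out : Int) : Decidable (Spec_solve original target out) := by unfold Spec_solve; infer_instance

-- ===== CLAIM (what is proved, stated in full; the proofs are below) =====
def Claim_equal_solve : Prop := ∀ (original : String) (target : String), Dom_solve original target → Spec_solve original target (solve original target)

-- ===== LEMMAS AND PROOFS =====

-- running minimum of matched prev-row values over target positions < k
def runMin (prev : List (Option Int)) (tgt : List Char) (c : Char) (k : Nat) : Option Int :=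
  (List.range k).foldl
    (fun r j => if tgt.getD j ' ' == c then minO r (prev.getD j none) else r)
    none

theorem minO_map_add (a b : Option Int) :
    minO (a.map (· + 1)) (b.map (· + 1)) = (minO a b).map (· + 1) := by
  cases a <;> cases b <;> simp [minO, min_add_add_right]

theorem runMin_succ (prev : List (Option Int)) (tgt : List Char) (c : Char) (k : Nat) :
    runMin prev tgt c (k + 1) =
      if tgt.getD k ' ' == c then minO (runMin prev tgt c k) (prev.getD k none)
      else runMin prev tgt c k := by
  simp [runMin, List.range_succ]

-- the +1-shifted fold equals the unshifted fold, mapped by (+1)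
theorem fold_shift (prev : List (Option Int)) (tgt : List Char) (c : Char) :
    ∀ (k : Nat) (r : Option Int),
      (List.range k).foldl
        (fun acc j => if tgt.getD j ' ' == c then minO acc ((prev.getD j none).map (· + 1)) else acc)
        (r.map (· + 1))
      = ((List.range k).foldl
          (fun acc j => if tgt.getD j ' ' == c then minO acc (prev.getD j none) else acc) r).map (· + 1) := by
  intro k
  induction k with
  | zero => intro r; simp
  | succ k ih =>
    intro r
    simp only [List.range_succ, List.foldl_append, List.foldl_cons, List.foldl_nil, ih]
    split
    · rw [minO_map_add]
    · rfl

-- A's inner loop for t = i + 1 in terms of the running minimum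
theorem entryA_succ (prev : List (Option Int)) (tgt : List Char) (c : Char) (i : Nat) :
    entryA prev tgt c (i + 1) =
      if tgt.getD i ' ' == c then
        minO ((runMin prev tgt c i).map (· + 1)) (prev.getD i none)
      else (runMin prev tgt c i).map (· + 1) := by
  unfold entryA
  rw [List.range_succ, List.foldl_append]
  have hcongr :
      (List.range i).foldl
        (fun acc ti =>
          if tgt.getD ti ' ' == c then
            minO acc ((prev.getD ti none).map (fun v => if ti < (i + 1) - 1 then v + 1 else v))
          else acc) none
      = (List.range i).foldl
          (fun acc j => if tgt.getD j ' ' == c then minO acc ((prev.getD j none).map (· + 1)) else acc)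
          none := by
    apply PySem.List.foldl_congr_mem
    intro acc x hx
    have hlt : x < i := List.mem_range.mp hx
    simp [hlt]
  have hshift := fold_shift prev tgt c i none
  simp only [Option.map_none] at hshift
  rw [hcongr, hshift]
  simp only [List.foldl_cons, List.foldl_nil]
  have hfun : (prev.getD i none).map (fun v => if i < i + 1 - 1 then v + 1 else v)
      = prev.getD i none := by
    simp
  rw [hfun]
  rfl

-- invariant of Source B's inner loop: run = runMin, cur = entries of A's row
theorem rowB_invariant (prev : List (Option Int)) (tgt : List Char) (c : Char) :
    ∀ k : Nat,
      (List.range k).foldl (stepB prev tgt c) (none, [none])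
      = (runMin prev tgt c k,
         none :: (List.range k).map (fun j => entryA prev tgt c (j + 1))) := by
  intro k
  induction k with
  | zero => simp [runMin]
  | succ k ih =>
    rw [List.range_succ, List.foldl_append, ih]
    simp only [List.foldl_cons, List.foldl_nil, List.map_append, List.map_cons, List.map_nil]
    rw [runMin_succ, entryA_succ]
    unfold stepB
    split <;> simp

theorem rowA_eq_rowB (prev : List (Option Int)) (tgt : List Char) (c : Char) :
    rowA prev tgt c = rowB prev tgt c := by
  unfold rowA rowB
  rw [rowB_invariant]
  rw [List.range_succ_eq_map, List.map_cons, List.map_map]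
  have h0 : entryA prev tgt c 0 = none := by simp [entryA]
  rw [h0]
  rfl

theorem row0A_eq_row0B : ∀ tlen : Nat, row0A tlen = row0B tlen := by
  intro tlen
  induction tlen with
  | zero => rfl
  | succ n ih =>
    unfold row0A row0B
    rw [List.range_succ, List.map_append]
    unfold row0A row0B at ih
    rw [ih, List.replicate_succ']
    simp

-- ===== VERDICT (by name: the statement is the Claim_ definition above) =====
theorem solve_spec : Claim_equal_solve := by
  intro original target _
  unfold Spec_solve
  simp only [solve, solve_alt, rowA_eq_rowB, row0A_eq_row0B]
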